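-- pv_equiv track=rewrite | github.com/johnwroge/advent_of_code | 2024/Day_25/Solution.py | keys
-- ===== SOURCE A (Python) =====
-- def keys(grid):
--     C = len(grid[0])
--     R = len(grid) - 1
--     result = []
--     for i in range(C):
--         count = 0
--         for j in range(R, -1, -1):
--             if grid[j][i] != '#':
--                 result.append(count - 1)
--                 break
--             count += 1
--     return result
-- ===== SOURCE B (Python) =====
-- def keys(grid):
--     C = len(grid[0])
--     R = len(grid) - 1
--     last = [-1] * C
--     for j, row in enumerate(grid):
--         for i in range(C):
--             if row[i] != '#':
--                 last[i] = j
--     return [R - v - 1 for v in last if v != -1]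
-- ===== Notes on version B (the rewrite author's own statement) =====
-- stated objective: alternative
-- what changed: Replaces A's per-column bottom-up scan-with-break by a single row-major pass that records in a table last[i] the lowest row whose cell in column i is not '#', then emits R - last[i] - 1 per column, skipping columns whose entry is still the sentinel.
-- outside the precondition, e.g. on keys(['ab', 'x', '#y']): A returns [0, -1], B raises IndexError
import Mathlib
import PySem

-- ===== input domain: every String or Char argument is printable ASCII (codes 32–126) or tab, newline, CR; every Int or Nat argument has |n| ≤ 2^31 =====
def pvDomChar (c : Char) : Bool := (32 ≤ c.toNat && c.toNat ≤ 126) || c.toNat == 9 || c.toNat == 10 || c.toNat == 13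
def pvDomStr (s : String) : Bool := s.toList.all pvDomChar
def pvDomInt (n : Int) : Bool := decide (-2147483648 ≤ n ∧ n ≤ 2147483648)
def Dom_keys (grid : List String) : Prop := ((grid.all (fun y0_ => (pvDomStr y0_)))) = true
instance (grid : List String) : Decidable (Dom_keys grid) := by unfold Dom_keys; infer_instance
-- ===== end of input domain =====

-- B replaces A's per-column bottom-up scan-with-break by one row-major pass building a
-- table of the lowest non-'#' row per column, then a separate emit pass (alternative
-- decomposition, same asymptotic cost).

-- ===== PORT A =====
-- inner 'for j in range(R, -1, -1): …' loop with its break, threading count and result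
def keysInnerA (grid : List String) (i : Int) : List Int → Int → List Int → List Int
  | [], _, result => result
  | j :: js, count, result =>
    if PySem.List.pyGetD (PySem.List.pyGetD grid j "").toList i '#' ≠ '#'
    then result ++ [count - 1]
    else keysInnerA grid i js (count + 1) result

def keys (grid : List String) : List Int :=
  let C : Int := PySem.Str.len (PySem.List.pyGetD grid 0 "")
  let R : Int := (grid.length : Int) - 1
  (PySem.List.pyRange 0 C 1).foldl
    (fun result i => keysInnerA grid i (PySem.List.pyRange R (-1) (-1)) 0 result) []

-- ===== PORT B =====
def keys_alt (grid : List String) : List Int :=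
  let C : Int := PySem.Str.len (PySem.List.pyGetD grid 0 "")
  let R : Int := (grid.length : Int) - 1
  let last0 : List Int := List.replicate C.toNat (-1)
  let last := (PySem.List.enumerate grid).foldl
    (fun last jr =>
      (PySem.List.pyRange 0 C 1).foldl
        (fun last i =>
          if PySem.List.pyGetD jr.2.toList i '#' ≠ '#'
          then PySem.List.pySetD last i jr.1 else last) last) last0
  last.filterMap (fun v => if v ≠ -1 then some (R - v - 1) else none)

-- ===== PRECONDITION & SPEC =====
-- Pre_ excludes the empty grid (grid[0] raises IndexError) and grids containing a row
-- shorter than the first row, on which the column scans hit a missing cell and raise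
-- IndexError except when an earlier break accidentally skips the short cell.
def Pre_keys (grid : List String) : Prop :=
  grid ≠ [] ∧ ∀ s ∈ grid, (grid.headD "").toList.length ≤ s.toList.length
instance (grid : List String) : Decidable (Pre_keys grid) := by unfold Pre_keys; infer_instance
def pvWitness_keys : List String := ["#.", "##"]
def Spec_keys (grid : List String) (out : List Int) : Prop := out = keys_alt grid
instance (grid : List String) (out : List Int) : Decidable (Spec_keys grid out) := by unfold Spec_keys; infer_instance

-- ===== CLAIM (what is proved, stated in full; the proofs are below) =====
def Claim_equal_keys : Prop := ∀ (grid : List String), Dom_keys grid → Pre_keys grid → Spec_keys grid (keys grid)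

-- ===== LEMMAS AND PROOFS =====

-- the character grid[j][i] as both ports read it (getD with the defaults the ports use)
def pvCol (grid : List String) (k : Nat) : List Char := grid.map (fun r => r.toList.getD k '#')

-- A's inner scan as a function of the (reversed) column character list
def pvEmitA : List Char → Int → List Int
  | [], _ => []
  | x :: xs, count => if x ≠ '#' then [count - 1] else pvEmitA xs (count + 1)

-- B's per-column table entry: last row index (counted from s) holding a non-'#', else acc
def pvLast : List Char → Int → Int → Int
  | [], _, acc => acc
  | x :: xs, s, acc => pvLast xs (s + 1) (if x ≠ '#' then s else acc)

theorem pvMapRangeGetD {α β : Type} (xs : List α) (d : α) (f : α → β) :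
    (List.range xs.length).map (fun j => f (xs.getD j d)) = xs.map f := by
  apply List.ext_getElem (by simp)
  intro i h1 h2
  simp at h1
  simp [List.getElem?_eq_getElem h1]

theorem pvInnerA_emit (grid : List String) (i : Int) (js : List Int) (count : Int)
    (result : List Int) :
    keysInnerA grid i js count result =
      result ++ pvEmitA (js.map fun j =>
        PySem.List.pyGetD (PySem.List.pyGetD grid j "").toList i '#') count := by
  induction js generalizing count with
  | nil => simp [keysInnerA, pvEmitA]
  | cons j js ih =>
    simp only [keysInnerA, List.map_cons, pvEmitA]
    split_ifs with h
    · rfl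
    · exact ih (count + 1)

theorem pvColsA (grid : List String) (k : Nat) :
    ((PySem.List.pyRange ((grid.length : Int) - 1) (-1) (-1)).map fun j =>
        PySem.List.pyGetD (PySem.List.pyGetD grid j "").toList (k : Int) '#') =
      (pvCol grid k).reverse := by
  rw [PySem.List.pyRange_neg_one_eq_reverse]
  have h1 : (-1 : Int) + 1 = ((0 : Nat) : Int) := by norm_num
  have h2 : ((grid.length : Int) - 1) + 1 = ((grid.length : Nat) : Int) := by ring
  rw [h1, h2]
  show ((PySem.List.pyRange 0 (grid.length : Int) 1).reverse.map _) = _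
  rw [List.map_reverse, PySem.List.pyRange_zero_natCast, List.map_map]
  congr 1
  have hfun : ((fun j => PySem.List.pyGetD (PySem.List.pyGetD grid j "").toList (k : Int) '#')
      ∘ (fun (j : Nat) => (j : Int)))
      = fun (j : Nat) => (fun r : String => r.toList.getD k '#') (grid.getD j "") := by
    funext j
    simp [Function.comp, PySem.List.pyGetD_natCast]
  rw [hfun]
  exact pvMapRangeGetD grid "" (fun r => r.toList.getD k '#')

-- B's inner row pass, rewritten over Nat indices
theorem pvStepEq (row : List Char) (j : Int) :
    (fun (x : List Int) (y : Nat) =>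
        if PySem.List.pyGetD row (y : Int) '#' ≠ '#' then PySem.List.pySetD x (y : Int) j else x)
      = fun x y => if row.getD y '#' ≠ '#' then x.set y j else x := by
  funext x y
  simp [PySem.List.pyGetD_natCast, PySem.List.pySetD_natCast]

theorem pvLenRowFoldN (row : List Char) (j : Int) (is : List Nat) (last : List Int) :
    (is.foldl (fun x y => if row.getD y '#' ≠ '#' then x.set y j else x) last).length
      = last.length := by
  induction is generalizing last with
  | nil => rfl
  | cons i is ih =>
    rw [List.foldl_cons, ih]
    split_ifs <;> simp

theorem pvRowFold_getD (C : Nat) (row : List Char) (j : Int) (last : List Int) (k : Nat)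
    (hk : k < last.length) :
    ((PySem.List.pyRange 0 (C : Int) 1).foldl (fun l i =>
        if PySem.List.pyGetD row i '#' ≠ '#' then PySem.List.pySetD l i j else l) last).getD k 0
      = if k < C ∧ row.getD k '#' ≠ '#' then j else last.getD k 0 := by
  rw [show PySem.List.pyRange 0 (C : Int) 1 = PySem.List.pyRange 0 (C : Int) from rfl,
    PySem.List.pyRange_zero_natCast, List.foldl_map, pvStepEq]
  induction C with
  | zero => simp
  | succ n ih =>
    rw [List.range_succ, List.foldl_append, List.foldl_cons, List.foldl_nil]
    have hLlen : (List.foldl (fun x y => if row.getD y '#' ≠ '#' then x.set y j else x) last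
        (List.range n)).length = last.length := pvLenRowFoldN row j _ last
    by_cases hc : row.getD n '#' ≠ '#'
    · rw [if_pos hc]
      by_cases hkn : k = n
      · subst hkn
        rw [List.getD_eq_getElem _ _ (by rw [List.length_set, hLlen]; exact hk),
          List.getElem_set_self]
        rw [if_pos ⟨by omega, hc⟩]
      · rw [List.getD_eq_getElem?_getD, List.getElem?_set_ne (by omega),
          ← List.getD_eq_getElem?_getD, ih]
        have : (k < n + 1 ∧ row.getD k '#' ≠ '#') ↔ (k < n ∧ row.getD k '#' ≠ '#') := by
          constructor <;> rintro ⟨ha, hb⟩ <;> exact ⟨by omega, hb⟩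
        rw [if_congr this.symm rfl rfl]
    · rw [if_neg hc, ih]
      simp only [not_not] at hc
      by_cases hkn : k = n
      · subst hkn
        have hcond : ¬ (k < k + 1 ∧ row.getD k '#' ≠ '#') := fun h => h.2 hc
        have hcond2 : ¬ (k < k ∧ row.getD k '#' ≠ '#') := fun h => absurd h.1 (lt_irrefl k)
        rw [if_neg hcond2, if_neg hcond]
      · have : (k < n + 1 ∧ row.getD k '#' ≠ '#') ↔ (k < n ∧ row.getD k '#' ≠ '#') := by
          constructor <;> rintro ⟨ha, hb⟩ <;> refine ⟨by omega, hb⟩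
        rw [if_congr this rfl rfl]

-- the length of the last-table is preserved by B's folds
theorem pvLenRowFold (row : List Char) (j : Int) (is : List Int) (last : List Int) :
    (is.foldl (fun l i =>
      if PySem.List.pyGetD row i '#' ≠ '#' then PySem.List.pySetD l i j else l) last).length
      = last.length := by
  induction is generalizing last with
  | nil => rfl
  | cons i is ih =>
    rw [List.foldl_cons, ih]
    split_ifs <;> simp [PySem.List.length_pySetD]

theorem pvOuterLen (C : Int) (rows : List String) (s : Int) (last : List Int) :
    ((PySem.List.enumerate rows s).foldl (fun last jr =>
        (PySem.List.pyRange 0 C 1).foldl (fun l i =>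
          if PySem.List.pyGetD jr.2.toList i '#' ≠ '#' then PySem.List.pySetD l i jr.1 else l)
          last) last).length = last.length := by
  induction rows generalizing s last with
  | nil => rfl
  | cons r rows ih =>
    rw [PySem.List.enumerate_cons, List.foldl_cons, ih, pvLenRowFold]

theorem pvOuterFold_getD (C : Nat) (rows : List String) (s : Int) (last : List Int)
    (hlen : last.length = C) (k : Nat) (hk : k < C) :
    ((PySem.List.enumerate rows s).foldl (fun last jr =>
        (PySem.List.pyRange 0 (C : Int) 1).foldl (fun l i =>
          if PySem.List.pyGetD jr.2.toList i '#' ≠ '#' then PySem.List.pySetD l i jr.1 else l)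
          last) last).getD k 0
      = pvLast (rows.map fun r => r.toList.getD k '#') s (last.getD k 0) := by
  induction rows generalizing s last with
  | nil => simp [PySem.List.enumerate, pvLast]
  | cons r rows ih =>
    rw [PySem.List.enumerate_cons, List.foldl_cons, List.map_cons]
    have hlen' : ((PySem.List.pyRange 0 (C : Int) 1).foldl (fun l i =>
        if PySem.List.pyGetD r.toList i '#' ≠ '#' then PySem.List.pySetD l i s else l)
        last).length = C := by
      rw [pvLenRowFold]
      exact hlen
    rw [ih (s + 1) _ hlen']
    simp only [pvLast]
    congr 1
    rw [pvRowFold_getD C r.toList s last k (by omega)]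
    simp [hk]

theorem pvLast_append (ys : List Char) (x : Char) (s acc : Int) :
    pvLast (ys ++ [x]) s acc = if x ≠ '#' then s + (ys.length : Int) else pvLast ys s acc := by
  induction ys generalizing s acc with
  | nil => simp [pvLast]
  | cons y ys ih =>
    simp only [List.cons_append, pvLast, ih (s + 1)]
    by_cases hx : x ≠ '#'
    · rw [if_pos hx, if_pos hx]
      push_cast [List.length_cons]
      ring
    · rw [if_neg hx, if_neg hx]

-- the per-column bridge: A's bottom-up scan of a column equals B's table formula
theorem pvBridge (col : List Char) (c : Int) :
    pvEmitA col.reverse c =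
      if pvLast col 0 (-1) = -1 then []
      else [c + ((col.length : Int) - 1 - pvLast col 0 (-1)) - 1] := by
  induction col using List.reverseRecOn generalizing c with
  | nil => simp [pvEmitA, pvLast]
  | append_singleton ys x ih =>
    rw [List.reverse_append, List.reverse_singleton, List.singleton_append]
    simp only [pvEmitA, pvLast_append]
    by_cases hx : x ≠ '#'
    · rw [if_pos hx, if_pos hx, if_neg (by omega : ¬ ((0 : Int) + (ys.length : Int) = -1))]
      congr 1
      push_cast [List.length_append, List.length_singleton]
      ring
    · rw [if_neg hx, if_neg hx, ih (c + 1)]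
      by_cases hl : pvLast ys 0 (-1) = -1
      · rw [if_pos hl, if_pos hl]
      · rw [if_neg hl, if_neg hl]
        congr 1
        push_cast [List.length_append, List.length_singleton]
        ring

theorem keys_eq_alt (grid : List String) : keys grid = keys_alt grid := by
  have hC : PySem.Str.len (PySem.List.pyGetD grid 0 "") = (((grid.headD "").toList.length : Nat) : Int) := by
    rw [PySem.Str.len_eq, PySem.List.pyGetD_zero]
    cases grid <;> simp
  set c : Nat := (grid.headD "").toList.length with hc
  -- reduce A to a flatMap over the columns
  have hA : keys grid = (List.range c).flatMap fun k => pvEmitA (pvCol grid k).reverse 0 := by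
    simp only [keys, hC]
    rw [show PySem.List.pyRange 0 (c : Int) 1 = PySem.List.pyRange 0 (c : Int) from rfl,
      PySem.List.pyRange_zero_natCast, List.foldl_map]
    have heq : (fun (result : List Int) (k : Nat) => keysInnerA grid (k : Int)
        (PySem.List.pyRange ((grid.length : Int) - 1) (-1) (-1)) 0 result)
        = fun result k => result ++ pvEmitA (pvCol grid k).reverse 0 := by
      funext result k
      rw [pvInnerA_emit, pvColsA]
    rw [heq, PySem.List.foldl_append_eq_flatMap, List.nil_append]
  -- reduce B to a filterMap over the columns
  have hB : keys_alt grid = List.filterMap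
      (fun v => if v ≠ -1 then some ((grid.length : Int) - 1 - v - 1) else none)
      ((List.range c).map fun k => pvLast (pvCol grid k) 0 (-1)) := by
    simp only [keys_alt, hC]
    congr 1
    have htoNat : ((c : Int)).toNat = c := Int.toNat_natCast c
    rw [htoNat]
    apply List.ext_getElem
    · rw [pvOuterLen, List.length_replicate, List.length_map, List.length_range]
    · intro k hk1 hk2
      have hkc : k < c := by
        rw [List.length_map, List.length_range] at hk2
        exact hk2
      rw [← List.getD_eq_getElem _ 0 hk1, ← List.getD_eq_getElem _ 0 hk2]
      rw [pvOuterFold_getD c grid 0 _ (List.length_replicate) k hkc]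
      rw [List.getD_replicate _ hkc]
      rw [List.getD_eq_getElem _ 0 hk2, List.getElem_map, List.getElem_range]
      rfl
  rw [hA, hB, List.filterMap_map, List.filterMap_eq_flatMap_toList]
  congr 1
  funext k
  rw [pvBridge]
  by_cases h : pvLast (pvCol grid k) 0 (-1) = -1
  · simp [h, Function.comp]
  · have hlen : ((pvCol grid k).length : Int) = (grid.length : Int) := by
      simp [pvCol]
    simp only [Function.comp, h, ne_eq, not_false_iff, if_pos, Option.toList_some, if_false, hlen]
    congr 1
    ring

-- ===== VERDICT (by name: the statement is the Claim_ definition above) =====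
theorem keys_spec : Claim_equal_keys := by
  intro grid _ _
  exact keys_eq_alt grid
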